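-- pv_equiv track=rewrite | github.com/Taurids/3d_container | 3d_container_next2.py | box_choose_3d
-- ===== SOURCE A (Python) =====
-- def box_choose_3d(boxs, nums_simplePacking_1, nums_simplePacking_2, nums_simplePacking_3, nums_simplePacking_4, nums_simplePacking_5, nums_simplePacking_6):
--     l = -1
--     w = -1
--     h = -1
--     nums = -1
--     for i in range(len(boxs)):
--         if nums_simplePacking_1[i] != -1:
--             if nums == -1 or (nums != -1 and nums > nums_simplePacking_1[i]) or (nums != -1 and nums == nums_simplePacking_1[i] and l * w * h > boxs[i][0] * boxs[i][1] * boxs[i][2]):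
--                 l = boxs[i][0]
--                 w = boxs[i][1]
--                 h = boxs[i][2]
--                 nums = nums_simplePacking_1[i]
--         if nums_simplePacking_2[i] != -1:
--             if nums == -1 or (nums != -1 and nums > nums_simplePacking_2[i]) or (nums != -1 and nums == nums_simplePacking_2[i] and l * w * h > boxs[i][0] * boxs[i][1] * boxs[i][2]):
--                 l = boxs[i][0]
--                 w = boxs[i][2]
--                 h = boxs[i][1]
--                 nums = nums_simplePacking_2[i]
--         if nums_simplePacking_3[i] != -1:
--             if nums == -1 or (nums != -1 and nums > nums_simplePacking_3[i]) or (nums != -1 and nums == nums_simplePacking_3[i] and l * w * h > boxs[i][0] * boxs[i][1] * boxs[i][2]):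
--                 l = boxs[i][1]
--                 w = boxs[i][0]
--                 h = boxs[i][2]
--                 nums = nums_simplePacking_3[i]
--         if nums_simplePacking_4[i] != -1:
--             if nums == -1 or (nums != -1 and nums > nums_simplePacking_4[i]) or (nums != -1 and nums == nums_simplePacking_4[i] and l * w * h > boxs[i][0] * boxs[i][1] * boxs[i][2]):
--                 l = boxs[i][1]
--                 w = boxs[i][2]
--                 h = boxs[i][0]
--                 nums = nums_simplePacking_4[i]
--         if nums_simplePacking_5[i] != -1:
--             if nums == -1 or (nums != -1 and nums > nums_simplePacking_5[i]) or (nums != -1 and nums == nums_simplePacking_5[i] and l * w * h > boxs[i][0] * boxs[i][1] * boxs[i][2]):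
--                 l = boxs[i][2]
--                 w = boxs[i][0]
--                 h = boxs[i][1]
--                 nums = nums_simplePacking_5[i]
--         if nums_simplePacking_6[i] != -1:
--             if nums == -1 or (nums != -1 and nums > nums_simplePacking_6[i]) or (nums != -1 and nums == nums_simplePacking_6[i] and l * w * h > boxs[i][0] * boxs[i][1] * boxs[i][2]):
--                 l = boxs[i][2]
--                 w = boxs[i][1]
--                 h = boxs[i][0]
--                 nums = nums_simplePacking_6[i]
--     return l, w, h
-- ===== SOURCE B (Python) =====
-- def box_choose_3d(boxs, nums_simplePacking_1, nums_simplePacking_2, nums_simplePacking_3, nums_simplePacking_4, nums_simplePacking_5, nums_simplePacking_6):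
--     # Stage 1: materialize every valid (count, volume, dims) candidate in
--     # box-outer / orientation-inner order.
--     cands = []
--     for i, (a, b, c) in enumerate(boxs):
--         vol = a * b * c
--         for n, dims in ((nums_simplePacking_1[i], (a, b, c)),
--                         (nums_simplePacking_2[i], (a, c, b)),
--                         (nums_simplePacking_3[i], (b, a, c)),
--                         (nums_simplePacking_4[i], (b, c, a)),
--                         (nums_simplePacking_5[i], (c, a, b)),
--                         (nums_simplePacking_6[i], (c, b, a))):
--             if n != -1:
--                 cands.append((n, vol, dims))
--     if not cands:
--         return (-1, -1, -1)
--     # Stage 2: minimum count, Stage 3: minimum volume among that count.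
--     m = min(n for n, _, _ in cands)
--     v = min(vol for n, vol, _ in cands if n == m)
--     # Stage 4: the first candidate realizing (m, v) wins.
--     for n, vol, dims in cands:
--         if n == m and vol == v:
--             return dims
-- ===== Notes on version B (the rewrite author's own statement) =====
-- stated objective: simpler
-- what changed: Replaces A's single-pass running best with six unrolled update blocks by a staged pipeline: materialize the list of all valid (count, volume, dims) candidates once, then compute the minimum count, then the minimum volume among that count, then return the first candidate realizing both.
import Mathlib
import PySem

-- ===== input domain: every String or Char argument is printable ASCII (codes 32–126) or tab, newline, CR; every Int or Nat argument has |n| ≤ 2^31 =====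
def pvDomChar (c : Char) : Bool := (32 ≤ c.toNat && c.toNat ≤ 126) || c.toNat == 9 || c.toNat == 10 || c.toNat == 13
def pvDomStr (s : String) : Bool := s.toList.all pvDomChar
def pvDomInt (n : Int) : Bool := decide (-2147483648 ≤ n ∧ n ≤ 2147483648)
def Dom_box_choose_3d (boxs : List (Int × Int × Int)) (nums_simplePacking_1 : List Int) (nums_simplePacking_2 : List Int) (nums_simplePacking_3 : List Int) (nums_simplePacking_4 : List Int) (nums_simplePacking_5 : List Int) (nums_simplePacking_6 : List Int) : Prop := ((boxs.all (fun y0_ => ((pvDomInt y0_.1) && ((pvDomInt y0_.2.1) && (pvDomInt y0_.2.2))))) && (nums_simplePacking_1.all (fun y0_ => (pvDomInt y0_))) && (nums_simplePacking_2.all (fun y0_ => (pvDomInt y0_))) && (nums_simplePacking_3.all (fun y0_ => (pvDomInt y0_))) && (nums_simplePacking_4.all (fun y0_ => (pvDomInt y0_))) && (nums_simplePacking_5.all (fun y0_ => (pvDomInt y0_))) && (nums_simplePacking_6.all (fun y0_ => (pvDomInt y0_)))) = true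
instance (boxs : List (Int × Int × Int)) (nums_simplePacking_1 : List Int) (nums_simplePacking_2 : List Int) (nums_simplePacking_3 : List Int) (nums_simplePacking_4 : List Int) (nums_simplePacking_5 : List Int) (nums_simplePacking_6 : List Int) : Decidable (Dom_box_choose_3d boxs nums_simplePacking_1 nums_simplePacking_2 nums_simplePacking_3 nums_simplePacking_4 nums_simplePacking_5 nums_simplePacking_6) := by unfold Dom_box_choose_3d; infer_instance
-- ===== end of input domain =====

-- ===== PORT A =====
-- B replaces A's one-pass running best by a staged pipeline (collect candidates,
-- min count, min volume, first match); objective: simpler.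
-- Port of one of A's six identical if-blocks: candidate count c, assignment (x,y,z), box volume p.
def aOrient (s : Int × Int × Int × Int) (c x y z p : Int) : Int × Int × Int × Int :=
  if c ≠ -1 then
    (if s.2.2.2 = -1 ∨ (s.2.2.2 ≠ -1 ∧ s.2.2.2 > c) ∨
        (s.2.2.2 ≠ -1 ∧ s.2.2.2 = c ∧ s.1 * s.2.1 * s.2.2.1 > p) then (x, y, z, c) else s)
  else s

-- the body of A's loop for one index i (state is (l, w, h, nums))
def aStep (boxs : List (Int × Int × Int)) (n1 n2 n3 n4 n5 n6 : List Int)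
    (s : Int × Int × Int × Int) (i : Int) : Int × Int × Int × Int :=
  let bx := PySem.List.pyGetD boxs i ((0 : Int), (0 : Int), (0 : Int))
  let p := bx.1 * bx.2.1 * bx.2.2
  let s := aOrient s (PySem.List.pyGetD n1 i 0) bx.1 bx.2.1 bx.2.2 p
  let s := aOrient s (PySem.List.pyGetD n2 i 0) bx.1 bx.2.2 bx.2.1 p
  let s := aOrient s (PySem.List.pyGetD n3 i 0) bx.2.1 bx.1 bx.2.2 p
  let s := aOrient s (PySem.List.pyGetD n4 i 0) bx.2.1 bx.2.2 bx.1 p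
  let s := aOrient s (PySem.List.pyGetD n5 i 0) bx.2.2 bx.1 bx.2.1 p
  let s := aOrient s (PySem.List.pyGetD n6 i 0) bx.2.2 bx.2.1 bx.1 p
  s

def box_choose_3d (boxs : List (Int × Int × Int)) (nums_simplePacking_1 : List Int) (nums_simplePacking_2 : List Int) (nums_simplePacking_3 : List Int) (nums_simplePacking_4 : List Int) (nums_simplePacking_5 : List Int) (nums_simplePacking_6 : List Int) : Int × Int × Int :=
  let r := (PySem.List.pyRange 0 (PySem.List.len boxs) 1).foldl
    (aStep boxs nums_simplePacking_1 nums_simplePacking_2 nums_simplePacking_3 nums_simplePacking_4 nums_simplePacking_5 nums_simplePacking_6)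
    (-1, -1, -1, -1)
  (r.1, r.2.1, r.2.2.1)

-- ===== PORT B =====
-- the six (count, dims) orientation pairs of B's inner tuple for one enumerated box
def bSix (n1 n2 n3 n4 n5 n6 : List Int) (p : Int × (Int × Int × Int)) :
    List (Int × (Int × Int × Int)) :=
  let i := p.1
  let a := p.2.1
  let b := p.2.2.1
  let c := p.2.2.2
  [(PySem.List.pyGetD n1 i 0, (a, b, c)),
   (PySem.List.pyGetD n2 i 0, (a, c, b)),
   (PySem.List.pyGetD n3 i 0, (b, a, c)),
   (PySem.List.pyGetD n4 i 0, (b, c, a)),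
   (PySem.List.pyGetD n5 i 0, (c, a, b)),
   (PySem.List.pyGetD n6 i 0, (c, b, a))]

-- Stage 1 of Source B: the cands list built by the two nested append loops
def bCollect (boxs : List (Int × Int × Int)) (n1 n2 n3 n4 n5 n6 : List Int) :
    List (Int × Int × (Int × Int × Int)) :=
  (PySem.List.enumerate boxs 0).foldl (fun cands p =>
    let vol := p.2.1 * p.2.2.1 * p.2.2.2
    (bSix n1 n2 n3 n4 n5 n6 p).foldl
      (fun cands q => if q.1 ≠ -1 then cands ++ [(q.1, vol, q.2)] else cands) cands) []

-- Python's min() over a nonempty int list (running minimum); [] is unreachable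
-- from box_choose_3d_alt (Python's min would raise there)
def pyMinI : List Int → Int
  | [] => 0
  | x :: xs => xs.foldl (fun m y => if y < m then y else m) x

-- Stage 4 of Source B: first candidate with count m and volume v; [] is unreachable
-- from box_choose_3d_alt (a candidate realizing (m, v) always exists)
def firstDims (m v : Int) : List (Int × Int × (Int × Int × Int)) → Int × Int × Int
  | [] => (-1, -1, -1)
  | t :: ts => if t.1 = m ∧ t.2.1 = v then t.2.2 else firstDims m v ts

def box_choose_3d_alt (boxs : List (Int × Int × Int)) (nums_simplePacking_1 : List Int) (nums_simplePacking_2 : List Int) (nums_simplePacking_3 : List Int) (nums_simplePacking_4 : List Int) (nums_simplePacking_5 : List Int) (nums_simplePacking_6 : List Int) : Int × Int × Int :=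
  let cands := bCollect boxs nums_simplePacking_1 nums_simplePacking_2 nums_simplePacking_3 nums_simplePacking_4 nums_simplePacking_5 nums_simplePacking_6
  match cands with
  | [] => (-1, -1, -1)
  | _ :: _ =>
    let m := pyMinI (cands.map (fun t => t.1))
    let v := pyMinI ((cands.filter (fun t => t.1 == m)).map (fun t => t.2.1))
    firstDims m v cands

-- ===== PRECONDITION & SPEC =====
-- Pre_: each of the six counts lists must cover every index of boxs, else Python A raises IndexError.
def Pre_box_choose_3d (boxs : List (Int × Int × Int)) (nums_simplePacking_1 : List Int) (nums_simplePacking_2 : List Int) (nums_simplePacking_3 : List Int) (nums_simplePacking_4 : List Int) (nums_simplePacking_5 : List Int) (nums_simplePacking_6 : List Int) : Prop :=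
  boxs.length ≤ nums_simplePacking_1.length ∧ boxs.length ≤ nums_simplePacking_2.length ∧
  boxs.length ≤ nums_simplePacking_3.length ∧ boxs.length ≤ nums_simplePacking_4.length ∧
  boxs.length ≤ nums_simplePacking_5.length ∧ boxs.length ≤ nums_simplePacking_6.length
instance (boxs : List (Int × Int × Int)) (nums_simplePacking_1 : List Int) (nums_simplePacking_2 : List Int) (nums_simplePacking_3 : List Int) (nums_simplePacking_4 : List Int) (nums_simplePacking_5 : List Int) (nums_simplePacking_6 : List Int) : Decidable (Pre_box_choose_3d boxs nums_simplePacking_1 nums_simplePacking_2 nums_simplePacking_3 nums_simplePacking_4 nums_simplePacking_5 nums_simplePacking_6) := by unfold Pre_box_choose_3d; infer_instance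
def pvWitness_box_choose_3d : (List (Int × Int × Int)) × List Int × List Int × List Int × List Int × List Int × List Int :=
  ([(2, 3, 4)], [5], [-1], [2], [2], [-1], [1])

def Spec_box_choose_3d (boxs : List (Int × Int × Int)) (nums_simplePacking_1 : List Int) (nums_simplePacking_2 : List Int) (nums_simplePacking_3 : List Int) (nums_simplePacking_4 : List Int) (nums_simplePacking_5 : List Int) (nums_simplePacking_6 : List Int) (out : Int × Int × Int) : Prop := out = box_choose_3d_alt boxs nums_simplePacking_1 nums_simplePacking_2 nums_simplePacking_3 nums_simplePacking_4 nums_simplePacking_5 nums_simplePacking_6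
instance (boxs : List (Int × Int × Int)) (nums_simplePacking_1 : List Int) (nums_simplePacking_2 : List Int) (nums_simplePacking_3 : List Int) (nums_simplePacking_4 : List Int) (nums_simplePacking_5 : List Int) (nums_simplePacking_6 : List Int) (out : Int × Int × Int) : Decidable (Spec_box_choose_3d boxs nums_simplePacking_1 nums_simplePacking_2 nums_simplePacking_3 nums_simplePacking_4 nums_simplePacking_5 nums_simplePacking_6 out) := by unfold Spec_box_choose_3d; infer_instance

-- ===== CLAIM (what is proved, stated in full; the proofs are below) =====
def Claim_equal_box_choose_3d : Prop := ∀ (boxs : List (Int × Int × Int)) (nums_simplePacking_1 : List Int) (nums_simplePacking_2 : List Int) (nums_simplePacking_3 : List Int) (nums_simplePacking_4 : List Int) (nums_simplePacking_5 : List Int) (nums_simplePacking_6 : List Int), Dom_box_choose_3d boxs nums_simplePacking_1 nums_simplePacking_2 nums_simplePacking_3 nums_simplePacking_4 nums_simplePacking_5 nums_simplePacking_6 → Pre_box_choose_3d boxs nums_simplePacking_1 nums_simplePacking_2 nums_simplePacking_3 nums_simplePacking_4 nums_simplePacking_5 nums_simplePacking_6 → Spec_box_choose_3d boxs nums_simplePacking_1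 nums_simplePacking_2 nums_simplePacking_3 nums_simplePacking_4 nums_simplePacking_5 nums_simplePacking_6 (box_choose_3d boxs nums_simplePacking_1 nums_simplePacking_2 nums_simplePacking_3 nums_simplePacking_4 nums_simplePacking_5 nums_simplePacking_6)

-- ===== LEMMAS AND PROOFS =====

-- The lexicographic running-best step on candidates (count, volume, dims):
-- take the new candidate exactly when it is strictly better.
def rbStep (s t : Int × Int × (Int × Int × Int)) : Int × Int × (Int × Int × Int) :=
  if t.1 < s.1 ∨ (t.1 = s.1 ∧ t.2.1 < s.2.1) then t else s

def rbUpd (b : Option (Int × Int × (Int × Int × Int))) (t : Int × Int × (Int × Int × Int)) :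
    Option (Int × Int × (Int × Int × Int)) :=
  match b with
  | none => some t
  | some s => some (rbStep s t)

-- invariant tying A's state (l, w, h, nums) to the running best over candidates
def StRel (s : Int × Int × Int × Int) (b : Option (Int × Int × (Int × Int × Int))) : Prop :=
  (s = (-1, -1, -1, -1) ∧ b = none) ∨
  (s.2.2.2 ≠ -1 ∧ b = some (s.2.2.2, s.1 * s.2.1 * s.2.2.1, (s.1, s.2.1, s.2.2.1)))

-- per-box candidate list: the same conditional appends, started from []
def pbList (vol : Int) : List (Int × (Int × Int × Int)) → List (Int × Int × (Int × Int × Int))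
  | [] => []
  | q :: qs => (if q.1 ≠ -1 then [(q.1, vol, q.2)] else []) ++ pbList vol qs

lemma inner_build (vol : Int) (qs : List (Int × (Int × Int × Int)))
    (acc : List (Int × Int × (Int × Int × Int))) :
    qs.foldl (fun cands q => if q.1 ≠ -1 then cands ++ [(q.1, vol, q.2)] else cands) acc
      = acc ++ pbList vol qs := by
  induction qs generalizing acc with
  | nil => simp [pbList]
  | cons q qs ih =>
      simp only [List.foldl_cons, pbList, ih]
      by_cases h : q.1 = -1 <;> simp [h]

lemma collect_eq (boxs : List (Int × Int × Int)) (n1 n2 n3 n4 n5 n6 : List Int) :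
    bCollect boxs n1 n2 n3 n4 n5 n6
      = (PySem.List.enumerate boxs 0).flatMap
          (fun p => pbList (p.2.1 * p.2.2.1 * p.2.2.2) (bSix n1 n2 n3 n4 n5 n6 p)) := by
  unfold bCollect
  simp only [inner_build]
  exact PySem.List.foldl_append_eq_flatMap _ _ _

lemma rel_orient (s : Int × Int × Int × Int) (b : Option (Int × Int × (Int × Int × Int)))
    (c x y z p : Int) (hp : x * y * z = p) (h : StRel s b) :
    StRel (aOrient s c x y z p)
      (List.foldl rbUpd b (if c ≠ -1 then [(c, p, (x, y, z))] else [])) := by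
  by_cases hc : c = -1
  · simpa [aOrient, hc] using h
  rw [if_pos hc]
  simp only [List.foldl_cons, List.foldl_nil]
  rcases h with ⟨hs, hb⟩ | ⟨hn, hb⟩
  · subst hs hb
    simp [StRel, aOrient, rbUpd, hc, hp]
  · obtain ⟨l, w, hh, nums⟩ := s
    simp only at hn hb
    subst hb
    unfold StRel aOrient rbUpd rbStep
    rw [if_pos hc]
    dsimp only
    split_ifs with hA hR hR
    · exact Or.inr ⟨hc, by rw [hp]⟩
    · exfalso
      rcases hA with h | ⟨_, hgt⟩ | ⟨_, heq, hlt⟩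
      · exact hn h
      · exact hR (Or.inl hgt)
      · exact hR (Or.inr ⟨heq.symm, hlt⟩)
    · exfalso
      rcases hR with hlt | ⟨heq, hlt⟩
      · exact hA (Or.inr (Or.inl ⟨hn, hlt⟩))
      · exact hA (Or.inr (Or.inr ⟨hn, heq.symm, hlt⟩))
    · exact Or.inr ⟨hn, rfl⟩

lemma rel_step (boxs : List (Int × Int × Int)) (n1 n2 n3 n4 n5 n6 : List Int)
    (s : Int × Int × Int × Int) (b : Option (Int × Int × (Int × Int × Int))) (i : Int)
    (h : StRel s b) :
    StRel (aStep boxs n1 n2 n3 n4 n5 n6 s i)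
      (List.foldl rbUpd b
        (pbList ((PySem.List.pyGetD boxs i ((0 : Int), (0 : Int), (0 : Int))).1 *
                 (PySem.List.pyGetD boxs i ((0 : Int), (0 : Int), (0 : Int))).2.1 *
                 (PySem.List.pyGetD boxs i ((0 : Int), (0 : Int), (0 : Int))).2.2)
          (bSix n1 n2 n3 n4 n5 n6 (i, PySem.List.pyGetD boxs i ((0 : Int), (0 : Int), (0 : Int)))))) := by
  simp only [aStep, bSix, pbList, List.append_nil, List.foldl_append]
  exact rel_orient _ _ _ _ _ _ _ (by ring)
    (rel_orient _ _ _ _ _ _ _ (by ring)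
      (rel_orient _ _ _ _ _ _ _ (by ring)
        (rel_orient _ _ _ _ _ _ _ (by ring)
          (rel_orient _ _ _ _ _ _ _ (by ring)
            (rel_orient _ _ _ _ _ _ _ (by ring) h)))))

lemma rel_fold (boxs : List (Int × Int × Int)) (n1 n2 n3 n4 n5 n6 : List Int)
    (L : List Int) (s : Int × Int × Int × Int) (b : Option (Int × Int × (Int × Int × Int)))
    (h : StRel s b) :
    StRel (L.foldl (aStep boxs n1 n2 n3 n4 n5 n6) s)
      (List.foldl rbUpd b
        ((L.map (fun j => ((j : Int), PySem.List.pyGetD boxs j ((0 : Int), (0 : Int), (0 : Int))))).flatMap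
          (fun p => pbList (p.2.1 * p.2.2.1 * p.2.2.2) (bSix n1 n2 n3 n4 n5 n6 p)))) := by
  induction L generalizing s b with
  | nil => exact h
  | cons j L ih =>
      simp only [List.map_cons, List.flatMap_cons, List.foldl_append, List.foldl_cons]
      exact ih _ _ (rel_step boxs n1 n2 n3 n4 n5 n6 s b j h)

lemma rbUpd_some (L : List (Int × Int × (Int × Int × Int))) (s : Int × Int × (Int × Int × Int)) :
    List.foldl rbUpd (some s) L = some (L.foldl rbStep s) := by
  induction L generalizing s with
  | nil => rfl
  | cons t L ih => simpa [rbUpd] using ih (rbStep s t)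

lemma mfold_le_init (L : List Int) (a : Int) :
    L.foldl (fun m y => if y < m then y else m) a ≤ a := by
  induction L generalizing a with
  | nil => simp
  | cons y L ih =>
      simp only [List.foldl_cons]
      exact le_trans (ih _) (by split_ifs <;> omega)

def stagedD (h : Int × Int × (Int × Int × Int)) (L : List (Int × Int × (Int × Int × Int))) :
    Int × Int × Int :=
  firstDims (pyMinI ((h :: L).map (fun t => t.1)))
    (pyMinI (((h :: L).filter (fun t => t.1 == pyMinI ((h :: L).map (fun t => t.1)))).map
      (fun t => t.2.1)))
    (h :: L)

lemma firstDims_hit (m v : Int) (x : Int × Int × (Int × Int × Int))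
    (l : List (Int × Int × (Int × Int × Int))) (h : x.1 = m ∧ x.2.1 = v) :
    firstDims m v (x :: l) = x.2.2 := by rw [firstDims, if_pos h]

lemma firstDims_skip (m v : Int) (x : Int × Int × (Int × Int × Int))
    (l : List (Int × Int × (Int × Int × Int))) (h : ¬ (x.1 = m ∧ x.2.1 = v)) :
    firstDims m v (x :: l) = firstDims m v l := by rw [firstDims, if_neg h]

lemma staged_cons (s t : Int × Int × (Int × Int × Int)) (L : List (Int × Int × (Int × Int × Int))) :
    stagedD s (t :: L) = stagedD (rbStep s t) L := by
  have hstep1 : (rbStep s t).1 = if t.1 < s.1 then t.1 else s.1 := by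
    unfold rbStep
    by_cases h1 : t.1 < s.1
    · rw [if_pos (Or.inl h1), if_pos h1]
    · by_cases h2 : t.1 = s.1 ∧ t.2.1 < s.2.1
      · rw [if_pos (Or.inr h2), if_neg h1]; omega
      · rw [if_neg (by rintro (h | h); exacts [h1 h, h2 h]), if_neg h1]
  have hm : pyMinI ((s :: t :: L).map (fun t => t.1))
      = pyMinI ((rbStep s t :: L).map (fun t => t.1)) := by
    simp only [List.map_cons, pyMinI, List.foldl_cons, hstep1]
  unfold stagedD
  rw [hm]
  set M := pyMinI ((rbStep s t :: L).map (fun t => t.1)) with hMdef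
  have hMu : M ≤ (rbStep s t).1 := by
    rw [hMdef]; simp only [List.map_cons, pyMinI]; exact mfold_le_init _ _
  have hMs : M ≤ s.1 := by rw [hstep1] at hMu; split_ifs at hMu <;> omega
  have hMt : M ≤ t.1 := by rw [hstep1] at hMu; split_ifs at hMu <;> omega
  by_cases h1 : t.1 < s.1
  · -- new candidate strictly better on count: rbStep s t = t and s can never be selected
    have hu : rbStep s t = t := by unfold rbStep; rw [if_pos (Or.inl h1)]
    have hsM : ¬ s.1 = M := by omega
    rw [hu, List.filter_cons_of_neg (by simpa using hsM),
      firstDims_skip _ _ _ _ (fun hx => hsM hx.1)]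
  · by_cases h2 : s.1 < t.1
    · -- old candidate strictly better on count: rbStep s t = s and t can never be selected
      have hu : rbStep s t = s := by unfold rbStep; rw [if_neg (by omega)]
      have htM : ¬ t.1 = M := by omega
      have hft : (t.1 == M) = false := by simpa using htM
      rw [hu]
      simp only [List.filter_cons, hft, Bool.false_eq_true, if_false]
      by_cases hsm : s.1 = M ∧ s.2.1 = pyMinI ((if (s.1 == M) = true then
          s :: List.filter (fun t => t.1 == M) L else List.filter (fun t => t.1 == M) L).map
          (fun t => t.2.1))
      · rw [firstDims_hit _ _ _ _ hsm, firstDims_hit _ _ _ _ hsm]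
      · rw [firstDims_skip _ _ _ _ hsm, firstDims_skip _ _ _ _ hsm,
          firstDims_skip _ _ _ _ (fun hx => htM hx.1)]
    · -- equal counts: the volume comparison decides
      have h3 : t.1 = s.1 := by omega
      have hu1 : (rbStep s t).1 = s.1 := by rw [hstep1, if_neg h1]
      have hu2 : (rbStep s t).2.1 = if t.2.1 < s.2.1 then t.2.1 else s.2.1 := by
        unfold rbStep
        by_cases hv : t.2.1 < s.2.1
        · rw [if_pos (Or.inr ⟨h3, hv⟩), if_pos hv]
        · rw [if_neg (by rintro (h | h); exacts [h1 h, hv h.2]), if_neg hv]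
      by_cases hsM : s.1 = M
      · -- counts equal the minimum: s, t and rbStep s t all pass the count filter
        have htM : t.1 = M := by omega
        have huM : (rbStep s t).1 = M := by omega
        have hv : pyMinI (((s :: t :: L).filter (fun x => x.1 == M)).map (fun x => x.2.1))
            = pyMinI (((rbStep s t :: L).filter (fun x => x.1 == M)).map (fun x => x.2.1)) := by
          simp only [List.filter_cons, beq_iff_eq, hsM, htM, huM, ite_true, List.map_cons,
            pyMinI, List.foldl_cons, hu2]
        rw [hv]
        set V := pyMinI (((rbStep s t :: L).filter (fun x => x.1 == M)).map (fun x => x.2.1))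
          with hVdef
        have hVu : V ≤ (rbStep s t).2.1 := by
          rw [hVdef]
          simp only [List.filter_cons, beq_iff_eq, huM, ite_true, List.map_cons, pyMinI]
          exact mfold_le_init _ _
        have hVs : V ≤ s.2.1 := by rw [hu2] at hVu; split_ifs at hVu <;> omega
        have hVt : V ≤ t.2.1 := by rw [hu2] at hVu; split_ifs at hVu <;> omega
        by_cases hvlt : t.2.1 < s.2.1
        · have hu : rbStep s t = t := by unfold rbStep; rw [if_pos (Or.inr ⟨h3, hvlt⟩)]
          have hs2 : ¬ s.2.1 = V := by omega
          rw [hu] at *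
          rw [firstDims_skip _ _ _ _ (fun hx => hs2 hx.2)]
        · have hu : rbStep s t = s := by
            unfold rbStep; rw [if_neg (by rintro (h | h); exacts [h1 h, hvlt h.2])]
          rw [hu] at *
          by_cases hs2 : s.2.1 = V
          · rw [firstDims_hit _ _ _ _ ⟨hsM, hs2⟩, firstDims_hit _ _ _ _ ⟨hsM, hs2⟩]
          · have ht2 : ¬ t.2.1 = V := by omega
            rw [firstDims_skip _ _ _ _ (fun hx => hs2 hx.2),
              firstDims_skip _ _ _ _ (fun hx => ht2 hx.2),
              firstDims_skip _ _ _ _ (fun hx => hs2 hx.2)]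
      · -- counts above the minimum: none of the heads passes the filter or is selected
        have htM : ¬ t.1 = M := by omega
        have huM : ¬ (rbStep s t).1 = M := by omega
        have hfs : (s.1 == M) = false := by simpa using hsM
        have hft : (t.1 == M) = false := by simpa using htM
        have hfu : ((rbStep s t).1 == M) = false := by simpa using huM
        simp only [List.filter_cons, hfs, hft, hfu, Bool.false_eq_true, if_false]
        rw [firstDims_skip _ _ _ _ (fun hx => hsM hx.1),
          firstDims_skip _ _ _ _ (fun hx => htM hx.1),
          firstDims_skip _ _ _ _ (fun hx => huM hx.1)]

lemma staged_eq_fold (L : List (Int × Int × (Int × Int × Int)))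
    (s : Int × Int × (Int × Int × Int)) :
    stagedD s L = (L.foldl rbStep s).2.2 := by
  induction L generalizing s with
  | nil => simp [stagedD, pyMinI, firstDims]
  | cons t L ih => rw [staged_cons, List.foldl_cons]; exact ih _

-- ===== VERDICT (by name: the statement is the Claim_ definition above) =====
theorem box_choose_3d_spec : Claim_equal_box_choose_3d := by
  intro boxs n1 n2 n3 n4 n5 n6 _ _
  have hen := PySem.List.enumerate_eq_map_pyRange boxs ((0 : Int), (0 : Int), (0 : Int))
  unfold Spec_box_choose_3d
  simp only [box_choose_3d, box_choose_3d_alt, collect_eq, PySem.List.len_eq, hen]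
  have h := rel_fold boxs n1 n2 n3 n4 n5 n6 (PySem.List.pyRange 0 ((boxs.length : Int)) 1)
    (-1, -1, -1, -1) none (Or.inl ⟨rfl, rfl⟩)
  rcases hcn : ((PySem.List.pyRange 0 ((boxs.length : Int)) 1).map
      (fun j => ((j : Int), PySem.List.pyGetD boxs j ((0 : Int), (0 : Int), (0 : Int))))).flatMap
      (fun p => pbList (p.2.1 * p.2.2.1 * p.2.2.2) (bSix n1 n2 n3 n4 n5 n6 p)) with _ | ⟨c, cs⟩
  · rw [hcn] at h ⊢
    rcases h with ⟨hs, _⟩ | ⟨_, hb⟩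
    · rw [hs]
    · simp at hb
  · rw [hcn] at h ⊢
    simp only [List.foldl_cons] at h
    rw [show rbUpd none c = some c from rfl, rbUpd_some] at h
    rcases h with ⟨_, hb⟩ | ⟨hn, hb⟩
    · exact absurd hb (by simp)
    · have hfold := Option.some.inj hb
      show _ = stagedD c cs
      rw [staged_eq_fold, hfold]
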